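-- pv_equiv track=rewrite | github.com/jocho-here/coding-problems | python/divisible_room_num.py | num_divisible_room
-- ===== SOURCE A (Python) =====
-- def num_divisible_room(x, y, n, m):
-- 	# x, y are the dividing factors
-- 	# n is total number of floors in the building
-- 	# m_k is number of rooms on floor k
-- 	room_nums = []
--
-- 	for floor in range(0, n):
-- 		for room in range(0, int(m[floor])):
-- 			room_nums.append((floor + 1) * 100 + (room + 1))
--
-- 	counter = 0
--
-- 	for room_num in room_nums:
-- 		if room_num % x == 0 or room_num % y == 0:
-- 			counter += 1
--
-- 	return counter
-- ===== SOURCE B (Python) =====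
-- def num_divisible_room(x, y, n, m):
--     # Per-floor inclusion-exclusion: count integers in (base, base+mk] divisible
--     # by x or y as D(base+mk) - D(base), D(t) = t//|x| + t//|y| - t//lcm.
--     ax, ay = abs(x), abs(y)
--     a, b = ax, ay
--     while b:
--         a, b = b, a % b
--     l = ax * ay // a
--
--     def upto(t):
--         return t // ax + t // ay - t // l
--
--     total = 0
--     for f in range(n):
--         mk = int(m[f])
--         if mk > 0:
--             base = (f + 1) * 100
--             total += upto(base + mk) - upto(base)
--     return total
-- ===== Notes on version B (the rewrite author's own statement) =====
-- stated objective: faster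
-- what changed: Replaces the materialised list of all room numbers and its O(sum m_k) scan with a per-floor closed-form inclusion-exclusion count (floor divisions by |x|, |y| and lcm(x,y)), one O(1) step per floor.
-- outside the precondition, e.g. on num_divisible_room(0, 0, 0, []): A returns 0, B raises ZeroDivisionError
import Mathlib
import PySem

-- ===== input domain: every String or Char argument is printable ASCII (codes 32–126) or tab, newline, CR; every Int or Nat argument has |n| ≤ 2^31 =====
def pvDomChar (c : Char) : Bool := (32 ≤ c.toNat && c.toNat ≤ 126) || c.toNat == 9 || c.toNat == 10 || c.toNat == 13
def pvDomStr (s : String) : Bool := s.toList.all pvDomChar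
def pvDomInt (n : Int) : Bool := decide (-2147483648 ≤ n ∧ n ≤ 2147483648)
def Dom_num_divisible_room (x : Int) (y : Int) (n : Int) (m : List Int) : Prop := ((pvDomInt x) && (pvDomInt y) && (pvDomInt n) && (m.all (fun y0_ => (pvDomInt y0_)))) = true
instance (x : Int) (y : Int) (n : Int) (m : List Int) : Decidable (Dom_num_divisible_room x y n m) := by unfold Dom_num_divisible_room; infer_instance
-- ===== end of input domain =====

-- B replaces the materialised list of all room numbers and its scan by a per-floor
-- closed-form inclusion-exclusion count (floor divisions by |x|, |y| and their lcm).

-- ===== PORT A =====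
def num_divisible_room (x : Int) (y : Int) (n : Int) (m : List Int) : Int :=
  -- room_nums built by the two nested loops, then the counting loop
  let room_nums : List Int :=
    (PySem.List.pyRange 0 n 1).foldl (fun acc floor =>
      (PySem.List.pyRange 0 (PySem.List.pyGetD m floor 0) 1).foldl
        (fun acc2 room => acc2 ++ [(floor + 1) * 100 + (room + 1)]) acc) []
  room_nums.foldl (fun counter room_num =>
    if PySem.Int.mod room_num x = 0 ∨ PySem.Int.mod room_num y = 0 then counter + 1 else counter) 0

-- ===== PORT B =====
-- while b: a, b = b, a % b   (Python's % is PySem.Int.mod)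
def pyGcdLoop (a : Int) (b : Int) : Int :=
  if _h : b = 0 then a else pyGcdLoop b (PySem.Int.mod a b)
termination_by b.natAbs
decreasing_by
  rcases lt_or_gt_of_ne _h with hb | hb
  · have h1 := (PySem.Int.mod_neg_bounds a hb).1
    have h2 := (PySem.Int.mod_neg_bounds a hb).2
    omega
  · have h1 := PySem.Int.mod_nonneg a hb
    have h2 := PySem.Int.mod_lt a hb
    omega

-- def upto(t): return t // ax + t // ay + t // l
def uptoDiv (ax : Int) (ay : Int) (l : Int) (t : Int) : Int :=
  PySem.Int.floordiv t ax + PySem.Int.floordiv t ay - PySem.Int.floordiv t l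

def num_divisible_room_alt (x : Int) (y : Int) (n : Int) (m : List Int) : Int :=
  let ax := |x|
  let ay := |y|
  let g := pyGcdLoop ax ay
  let l := PySem.Int.floordiv (ax * ay) g
  (PySem.List.pyRange 0 n 1).foldl (fun total f =>
    let mk := PySem.List.pyGetD m f 0
    if mk > 0 then
      let base := (f + 1) * 100
      total + (uptoDiv ax ay l (base + mk) - uptoDiv ax ay l base)
    else total) 0

-- ===== PRECONDITION & SPEC =====
-- Pre_ excludes the inputs where Python A raises (n > len(m): IndexError; a room exists and
-- x = 0 or y = 0: ZeroDivisionError in 'room_num % x'), plus the single degenerate corner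
-- x = y = 0 with zero rooms, where A returns 0 but B's lcm computation divides by zero.
def Pre_num_divisible_room (x : Int) (y : Int) (n : Int) (m : List Int) : Prop :=
  n ≤ (m.length : Int) ∧
    ((x ≠ 0 ∧ y ≠ 0) ∨
      ((x ≠ 0 ∨ y ≠ 0) ∧ ∀ f ∈ PySem.List.pyRange 0 n 1, PySem.List.pyGetD m f 0 ≤ 0))
instance (x : Int) (y : Int) (n : Int) (m : List Int) : Decidable (Pre_num_divisible_room x y n m) := by
  unfold Pre_num_divisible_room; infer_instance

def pvWitness_num_divisible_room : Int × Int × Int × List Int := (2, 5, 3, [4, 0, 7])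

def Spec_num_divisible_room (x : Int) (y : Int) (n : Int) (m : List Int) (out : Int) : Prop := out = num_divisible_room_alt x y n m
instance (x : Int) (y : Int) (n : Int) (m : List Int) (out : Int) : Decidable (Spec_num_divisible_room x y n m out) := by unfold Spec_num_divisible_room; infer_instance

-- ===== CLAIM (what is proved, stated in full; the proofs are below) =====
def Claim_equal_num_divisible_room : Prop := ∀ (x : Int) (y : Int) (n : Int) (m : List Int), Dom_num_divisible_room x y n m → Pre_num_divisible_room x y n m → Spec_num_divisible_room x y n m (num_divisible_room x y n m)

-- ===== LEMMAS AND PROOFS =====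

-- the gcd loop computes Int.gcd on nonnegative inputs
theorem pyGcdLoop_eq_gcd (a b : Int) : 0 ≤ a → 0 ≤ b → pyGcdLoop a b = (Int.gcd a b : Int) := by
  induction a, b using pyGcdLoop.induct with
  | case1 a =>
    intro ha _
    rw [pyGcdLoop]
    simp [Int.gcd_def, Int.natAbs_of_nonneg ha]
  | case2 a b hb0 ih =>
    intro ha hb
    have hbpos : 0 < b := lt_of_le_of_ne hb (Ne.symm hb0)
    have hmod : PySem.Int.mod a b = a % b := PySem.Int.mod_eq_emod_of_pos hbpos
    have hmn : 0 ≤ a % b := Int.emod_nonneg a (ne_of_gt hbpos)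
    rw [pyGcdLoop, dif_neg hb0, ih hb (hmod ▸ hmn), hmod]
    have key : (a % b).natAbs = a.natAbs % b.natAbs := by
      have h1 : ((a % b).natAbs : Int) = a % b := Int.natAbs_of_nonneg hmn
      have h2 : ((a.natAbs % b.natAbs : Nat) : Int) = a % b := by
        push_cast [Int.natAbs_of_nonneg ha, Int.natAbs_of_nonneg hb]
        rfl
      exact_mod_cast h1.trans h2.symm
    rw [Int.gcd_def, Int.gcd_def, key]
    rw [Nat.gcd_comm b.natAbs, ← Nat.gcd_rec, Nat.gcd_comm]

-- step of the division counter: for 0 < d, v/d - (v-1)/d is the indicator of d ∣ v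
theorem ediv_sub_ediv_pred (d v : Int) (hd : 0 < d) :
    v / d - (v - 1) / d = if d ∣ v then 1 else 0 := by
  split_ifs with h
  · obtain ⟨c, rfl⟩ := h
    have key := Int.add_mul_ediv_right (d - 1) (c - 1) (ne_of_gt hd)
    have hz : (d - 1) / d = 0 := Int.ediv_eq_zero_of_lt (by omega) (by omega)
    have h1 : d * c - 1 = (d - 1) + (c - 1) * d := by ring
    rw [Int.mul_ediv_cancel_left c (ne_of_gt hd), h1, key, hz]
    ring
  · have hr0 : 0 ≤ v % d := Int.emod_nonneg v (ne_of_gt hd)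
    have hrd : v % d < d := Int.emod_lt_of_pos v hd
    have hrne : v % d ≠ 0 := fun h0 => h (Int.dvd_of_emod_eq_zero h0)
    have hv : v % d + d * (v / d) = v := Int.emod_add_mul_ediv v d
    have key := Int.add_mul_ediv_right (v % d - 1) (v / d) (ne_of_gt hd)
    have hz : (v % d - 1) / d = 0 := Int.ediv_eq_zero_of_lt (by omega) (by omega)
    have h1 : v - 1 = (v % d - 1) + (v / d) * d := by linarith
    rw [h1, key, hz]
    ring

-- inclusion-exclusion indicator
theorem indicator_step (x y ax ay l v : Int) (hax : 0 < ax) (hay : 0 < ay) (hl : 0 < l)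
    (hx : ∀ w : Int, x ∣ w ↔ ax ∣ w) (hy : ∀ w : Int, y ∣ w ↔ ay ∣ w)
    (hiff : ∀ w : Int, l ∣ w ↔ (ax ∣ w ∧ ay ∣ w)) :
    (if x ∣ v ∨ y ∣ v then (1 : Int) else 0) =
      (v / ax + v / ay - v / l) - ((v - 1) / ax + (v - 1) / ay - (v - 1) / l) := by
  have e1 := ediv_sub_ediv_pred ax v hax
  have e2 := ediv_sub_ediv_pred ay v hay
  have e3 := ediv_sub_ediv_pred l v hl
  simp only [hiff] at e3
  by_cases h1 : ax ∣ v <;> by_cases h2 : ay ∣ v <;>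
    simp only [h1, h2, hx, hy, if_true, if_false, and_true, and_false, or_true,
      or_false] at e1 e2 e3 ⊢ <;>
    linarith

-- counting over one floor's range of rooms, in closed form
theorem count_range (x y ax ay l : Int) (hax : 0 < ax) (hay : 0 < ay) (hl : 0 < l)
    (hx : ∀ w : Int, x ∣ w ↔ ax ∣ w) (hy : ∀ w : Int, y ∣ w ↔ ay ∣ w)
    (hiff : ∀ w : Int, l ∣ w ↔ (ax ∣ w ∧ ay ∣ w)) (base : Int) :
    ∀ (k : Nat) (c0 : Int),
      (PySem.List.pyRange 0 (k : Int) 1).foldl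
          (fun c r => if PySem.Int.mod (base + r + 1) x = 0 ∨ PySem.Int.mod (base + r + 1) y = 0
            then c + 1 else c) c0
        = c0 + ((base + k) / ax + (base + k) / ay - (base + k) / l)
            - (base / ax + base / ay - base / l) := by
  intro k
  induction k with
  | zero =>
    intro c0
    simp [PySem.List.pyRange_one_eq_nil (le_refl (0 : Int))]
  | succ k ih =>
    intro c0
    have hcast : ((k + 1 : Nat) : Int) = (k : Int) + 1 := by push_cast; ring
    rw [hcast, PySem.List.pyRange_one_succ_right (by positivity), List.foldl_append, ih c0]
    simp only [List.foldl_cons, List.foldl_nil, PySem.Int.mod_eq_zero_iff_dvd]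
    have hind := indicator_step x y ax ay l (base + (k : Int) + 1) hax hay hl hx hy hiff
    have hb1 : base + ((k : Int) + 1) = base + (k : Int) + 1 := by ring
    have hb2 : base + (k : Int) + 1 - 1 = base + (k : Int) := by ring
    rw [hb2] at hind
    by_cases h : x ∣ (base + (k : Int) + 1) ∨ y ∣ (base + (k : Int) + 1) <;>
      simp only [h, if_true, if_false] at hind ⊢ <;>
      · rw [hb1]
        linarith [hind]

-- A's nested building loops produce the flatMap of per-floor room lists
theorem build_decomp (m : List Int) :
    ∀ (fs : List Int) (acc : List Int),
      fs.foldl (fun acc floor =>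
          (PySem.List.pyRange 0 (PySem.List.pyGetD m floor 0) 1).foldl
            (fun acc2 room => acc2 ++ [(floor + 1) * 100 + (room + 1)]) acc) acc
      = acc ++ fs.flatMap (fun floor =>
          (PySem.List.pyRange 0 (PySem.List.pyGetD m floor 0) 1).map
            (fun room => (floor + 1) * 100 + (room + 1))) := by
  intro fs
  induction fs with
  | nil => simp
  | cons f t ih =>
    intro acc
    simp only [List.foldl_cons, List.flatMap_cons]
    rw [PySem.List.foldl_append_singleton_eq_map, ih, List.append_assoc]

-- the central fold equality: counting the flattened room list = per-floor closed forms
theorem main_fold (x y ax ay l : Int) (m : List Int) (hax : 0 < ax) (hay : 0 < ay) (hl : 0 < l)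
    (hx : ∀ w : Int, x ∣ w ↔ ax ∣ w) (hy : ∀ w : Int, y ∣ w ↔ ay ∣ w)
    (hiff : ∀ w : Int, l ∣ w ↔ (ax ∣ w ∧ ay ∣ w)) :
    ∀ (fs : List Int) (c0 : Int),
      (fs.flatMap (fun floor =>
          (PySem.List.pyRange 0 (PySem.List.pyGetD m floor 0) 1).map
            (fun room => (floor + 1) * 100 + (room + 1)))).foldl
        (fun counter v =>
          if PySem.Int.mod v x = 0 ∨ PySem.Int.mod v y = 0 then counter + 1 else counter) c0
      = fs.foldl (fun total f =>
          if PySem.List.pyGetD m f 0 > 0 then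
            total + (uptoDiv ax ay l ((f + 1) * 100 + PySem.List.pyGetD m f 0)
              - uptoDiv ax ay l ((f + 1) * 100))
          else total) c0 := by
  intro fs
  induction fs with
  | nil => intro c0; rfl
  | cons f t ih =>
    intro c0
    simp only [List.flatMap_cons, List.foldl_cons, List.foldl_append]
    rw [ih]
    congr 1
    by_cases hmk : PySem.List.pyGetD m f 0 > 0
    · have hk : ((PySem.List.pyGetD m f 0).toNat : Int) = PySem.List.pyGetD m f 0 :=
        Int.toNat_of_nonneg (le_of_lt hmk)
      rw [if_pos hmk, List.foldl_map]
      have harg : ∀ r : Int, (f + 1) * 100 + (r + 1) = (f + 1) * 100 + r + 1 := by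
        intro r; ring
      simp only [harg]
      rw [← hk,
        count_range x y ax ay l hax hay hl hx hy hiff ((f + 1) * 100)
          ((PySem.List.pyGetD m f 0).toNat) c0]
      simp only [uptoDiv, PySem.Int.floordiv_eq_ediv_of_pos hax,
        PySem.Int.floordiv_eq_ediv_of_pos hay, PySem.Int.floordiv_eq_ediv_of_pos hl, hk]
      ring
    · rw [if_neg hmk]
      have hnil : PySem.List.pyRange 0 (PySem.List.pyGetD m f 0) 1 = [] :=
        PySem.List.pyRange_one_eq_nil (by omega)
      rw [hnil]
      rfl

-- with no positive floor count, A's flattened room list is empty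
theorem blocks_nil (m : List Int) :
    ∀ fs : List Int, (∀ f ∈ fs, PySem.List.pyGetD m f 0 ≤ 0) →
      fs.flatMap (fun floor =>
          (PySem.List.pyRange 0 (PySem.List.pyGetD m floor 0) 1).map
            (fun room => (floor + 1) * 100 + (room + 1))) = [] := by
  intro fs
  induction fs with
  | nil => intro _; rfl
  | cons f t ih =>
    intro h
    rw [List.flatMap_cons, PySem.List.pyRange_one_eq_nil (h f (List.mem_cons_self)),
      List.map_nil, List.nil_append]
    exact ih (fun g hg => h g (List.mem_cons_of_mem f hg))

-- with no positive floor count, B's fold never takes its if-branch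
theorem degenerate_foldB (ax ay l : Int) (m : List Int) :
    ∀ (fs : List Int) (c0 : Int), (∀ f ∈ fs, PySem.List.pyGetD m f 0 ≤ 0) →
      fs.foldl (fun total f =>
          if PySem.List.pyGetD m f 0 > 0 then
            total + (uptoDiv ax ay l ((f + 1) * 100 + PySem.List.pyGetD m f 0)
              - uptoDiv ax ay l ((f + 1) * 100))
          else total) c0 = c0 := by
  intro fs
  induction fs with
  | nil => intro c0 _; rfl
  | cons f t ih =>
    intro c0 h
    simp only [List.foldl_cons]
    rw [if_neg (by have := h f (List.mem_cons_self); omega)]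
    exact ih c0 (fun g hg => h g (List.mem_cons_of_mem f hg))

-- ===== VERDICT (by name: the statement is the Claim_ definition above) =====
theorem num_divisible_room_spec : Claim_equal_num_divisible_room := by
  intro x y n m _ hpre
  obtain ⟨_, hxy | ⟨_, hall⟩⟩ := hpre
  case inr =>
    -- degenerate corner: no floor has a positive room count, both sides count 0
    simp only [Spec_num_divisible_room, num_divisible_room, num_divisible_room_alt]
    rw [build_decomp m (PySem.List.pyRange 0 n 1) [], List.nil_append,
      blocks_nil m (PySem.List.pyRange 0 n 1) hall]
    exact (degenerate_foldB _ _ _ m (PySem.List.pyRange 0 n 1) 0 hall).symm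
  obtain ⟨hx0, hy0⟩ := hxy
  simp only [Spec_num_divisible_room, num_divisible_room, num_divisible_room_alt]
  have hax : 0 < |x| := abs_pos.mpr hx0
  have hay : 0 < |y| := abs_pos.mpr hy0
  -- gcd value
  have hg : pyGcdLoop |x| |y| = (Int.gcd x y : Int) := by
    rw [pyGcdLoop_eq_gcd |x| |y| (abs_nonneg x) (abs_nonneg y), Int.gcd_def, Int.gcd_def,
      Int.natAbs_abs, Int.natAbs_abs]
  have hgpos : (0 : Int) < (Int.gcd x y : Int) := by
    exact_mod_cast Int.gcd_pos_of_ne_zero_left y hx0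
  -- lcm value of B's l
  have hmul : (Int.gcd x y : Int) * (Int.lcm x y : Int) = |x| * |y| := by
    have h := Int.gcd_mul_lcm x y
    rw [Int.abs_eq_natAbs, Int.abs_eq_natAbs]
    exact_mod_cast h
  have hl : PySem.Int.floordiv (|x| * |y|) (pyGcdLoop |x| |y|) = (Int.lcm x y : Int) := by
    rw [hg, PySem.Int.floordiv_eq_ediv_of_pos hgpos, ← hmul,
      Int.mul_ediv_cancel_left _ (ne_of_gt hgpos)]
  have hlpos : (0 : Int) < (Int.lcm x y : Int) := by
    have : Int.lcm x y ≠ 0 := by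
      rw [Int.lcm_def]
      exact Nat.lcm_ne_zero (Int.natAbs_ne_zero.mpr hx0) (Int.natAbs_ne_zero.mpr hy0)
    exact_mod_cast Nat.pos_of_ne_zero this
  have hdx : ∀ w : Int, x ∣ w ↔ |x| ∣ w := fun w => (abs_dvd x w).symm
  have hdy : ∀ w : Int, y ∣ w ↔ |y| ∣ w := fun w => (abs_dvd y w).symm
  have hdl : ∀ w : Int, (Int.lcm x y : Int) ∣ w ↔ (|x| ∣ w ∧ |y| ∣ w) := by
    intro w
    rw [← Int.natAbs_dvd_natAbs (a := (Int.lcm x y : Int)),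
      ← Int.natAbs_dvd_natAbs (a := |x|), ← Int.natAbs_dvd_natAbs (a := |y|),
      Int.natAbs_natCast, Int.natAbs_abs, Int.natAbs_abs, Int.lcm_def]
    exact Nat.lcm_dvd_iff
  rw [build_decomp m (PySem.List.pyRange 0 n 1) [], List.nil_append, hl]
  exact main_fold x y |x| |y| (Int.lcm x y : Int) m hax hay hlpos hdx hdy hdl
    (PySem.List.pyRange 0 n 1) 0
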